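-- pv_equiv track=rewrite | github.com/hexanna1/hex-study | pattern_enumeration.py | _passes_cross_color_closest_filter
-- ===== SOURCE A (Python) =====
-- from typing import Iterable
--
-- Point = tuple[int, int]
--
-- def _delta(a: Point, b: Point) -> int:
--     dq = int(a[0]) - int(b[0])
--     dr = int(a[1]) - int(b[1])
--     return int(dq * dq + dq * dr + dr * dr)
--
-- def _min_delta_within(points: Iterable[Point]) -> int | None:
--     pts = tuple(points)
--     if len(pts) < 2:
--         return None
--     best: int | None = None
--     for i, a in enumerate(pts):
--         for b in pts[i + 1 :]:
--             d = _delta(a, b)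
--             best = d if best is None else min(best, d)
--     return best
--
-- def _min_delta_between(a_points: Iterable[Point], b_points: Iterable[Point]) -> int | None:
--     a_pts = tuple(a_points)
--     b_pts = tuple(b_points)
--     if not a_pts or not b_pts:
--         return None
--     best: int | None = None
--     for a in a_pts:
--         for b in b_pts:
--             d = _delta(a, b)
--             best = d if best is None else min(best, d)
--     return best
--
-- def _passes_cross_color_closest_filter(red: Iterable[Point], blue: Iterable[Point]) -> bool:
--     red_t = tuple(red)
--     blue_t = tuple(blue)
--     min_rb = _min_delta_between(red_t, blue_t)
--     if min_rb is None:
--         return True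
--     same_deltas = [d for d in (_min_delta_within(red_t), _min_delta_within(blue_t)) if d is not None]
--     if same_deltas and min(same_deltas) == 1 and min_rb >= 4:
--         return False
--     return True
-- ===== SOURCE B (Python) =====
-- # Hash-set neighbor probing: delta(a,b) = dq^2+dq*dr+dr^2 is the Eisenstein norm, so
-- # delta < 4 iff the coordinate offset is one of 13 fixed vectors (norms 0,1,3; 2 is not
-- # representable) and delta == 1 iff it is one of the 6 unit-neighbor vectors.
-- _NEI1 = ((1, 0), (-1, 0), (0, 1), (0, -1), (1, -1), (-1, 1))
-- _NEAR = ((0, 0),) + _NEI1 + ((1, 1), (-1, -1), (2, -1), (-2, 1), (1, -2), (-1, 2))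
--
--
-- def _passes_cross_color_closest_filter(red, blue):
--     red_t = tuple(red)
--     blue_t = tuple(blue)
--     if not red_t or not blue_t:
--         return True
--     blue_set = set(blue_t)
--     if any((q + dq, r + dr) in blue_set for q, r in red_t for dq, dr in _NEAR):
--         return True  # some cross-color pair has delta < 4
--     red_set = set(red_t)
--     if len(red_set) != len(red_t) or len(blue_set) != len(blue_t):
--         return True  # a duplicate point makes the min same-color delta 0, not 1
--     def _has_adjacent(pts, s):
--         return any((q + dq, r + dr) in s for q, r in pts for dq, dr in _NEI1)
--     return not (_has_adjacent(red_t, red_set) or _has_adjacent(blue_t, blue_set))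
-- ===== Notes on version B (the rewrite author's own statement) =====
-- stated objective: faster
-- what changed: Replaces the O((R+B)^2) all-pairs minimum-delta computations by hash-set membership probes of the 13 fixed coordinate offsets with hex-metric delta < 4 (and the 6 offsets with delta == 1), plus a set-size duplicate check, so no pair of points is ever enumerated.
import Mathlib
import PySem

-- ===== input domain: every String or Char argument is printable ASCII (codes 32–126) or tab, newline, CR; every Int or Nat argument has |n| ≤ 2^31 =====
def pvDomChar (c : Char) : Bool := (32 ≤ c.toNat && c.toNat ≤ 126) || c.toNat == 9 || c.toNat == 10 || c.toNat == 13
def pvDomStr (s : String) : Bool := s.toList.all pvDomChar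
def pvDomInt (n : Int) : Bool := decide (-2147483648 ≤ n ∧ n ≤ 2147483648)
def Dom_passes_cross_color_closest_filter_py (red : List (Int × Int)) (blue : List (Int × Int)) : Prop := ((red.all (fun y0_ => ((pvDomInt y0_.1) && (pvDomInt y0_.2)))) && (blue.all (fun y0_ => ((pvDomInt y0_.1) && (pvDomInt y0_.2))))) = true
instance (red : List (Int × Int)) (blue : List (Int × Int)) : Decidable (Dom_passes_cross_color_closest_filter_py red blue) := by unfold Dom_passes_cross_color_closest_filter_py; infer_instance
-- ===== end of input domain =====

-- B replaces A's all-pairs minimum-delta scans by hash-set probes of the 13 fixed offsets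
-- with hex delta < 4 (and the 6 with delta = 1) plus a set-size duplicate check (objective: faster).

-- ===== PORT A =====
def pyDelta (a b : Int × Int) : Int :=
  let dq := a.1 - b.1
  let dr := a.2 - b.2
  dq * dq + dq * dr + dr * dr

-- 'best = d if best is None else min(best, d)'
def pyStep (best : Option Int) (d : Int) : Option Int :=
  match best with
  | none => some d
  | some m => some (min m d)

def minDeltaWithin (pts : List (Int × Int)) : Option Int :=
  if pts.length < 2 then none
  else
    (PySem.List.enumerate pts).foldl
      (fun best ia =>
        (PySem.List.slice pts (some (ia.1 + 1)) none).foldl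
          (fun best b => pyStep best (pyDelta ia.2 b)) best)
      none

def minDeltaBetween (aPts bPts : List (Int × Int)) : Option Int :=
  if aPts = [] ∨ bPts = [] then none
  else
    aPts.foldl
      (fun best a => bPts.foldl (fun best b => pyStep best (pyDelta a b)) best)
      none

def passes_cross_color_closest_filter_py (red : List (Int × Int)) (blue : List (Int × Int)) : Bool :=
  match minDeltaBetween red blue with
  | none => true
  | some minRb =>
    let sameDeltas := ([minDeltaWithin red, minDeltaWithin blue]).filterMap id
    match PySem.List.min? sameDeltas (fun x => x) with
    | none => true
    | some m => if m = 1 ∧ 4 ≤ minRb then false else true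

-- ===== PORT B =====
def nei1Offs : List (Int × Int) := [(1, 0), (-1, 0), (0, 1), (0, -1), (1, -1), (-1, 1)]
def nearOffs : List (Int × Int) :=
  [(0, 0)] ++ nei1Offs ++ [(1, 1), (-1, -1), (2, -1), (-2, 1), (1, -2), (-1, 2)]

def hasAdjacent (pts : List (Int × Int)) (s : PySem.Set (Int × Int)) : Bool :=
  pts.any (fun p => nei1Offs.any (fun o => PySem.Set.contains s (p.1 + o.1, p.2 + o.2)))

def passes_cross_color_closest_filter_py_alt (red : List (Int × Int)) (blue : List (Int × Int)) : Bool :=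
  if red.isEmpty || blue.isEmpty then true
  else
    let blueSet := PySem.Set.ofList blue
    if red.any (fun p => nearOffs.any (fun o => PySem.Set.contains blueSet (p.1 + o.1, p.2 + o.2))) then
      true
    else
      let redSet := PySem.Set.ofList red
      if redSet.length ≠ red.length || blueSet.length ≠ blue.length then true
      else !(hasAdjacent red redSet || hasAdjacent blue blueSet)

-- ===== PRECONDITION & SPEC =====
def Spec_passes_cross_color_closest_filter_py (red : List (Int × Int)) (blue : List (Int × Int)) (out : Bool) : Prop := out = passes_cross_color_closest_filter_py_alt red blue
instance (red : List (Int × Int)) (blue : List (Int × Int)) (out : Bool) : Decidable (Spec_passes_cross_color_closest_filter_py red blue out) := by unfold Spec_passes_cross_color_closest_filter_py; infer_instance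

-- ===== CLAIM (what is proved, stated in full; the proofs are below) =====
def Claim_equal_passes_cross_color_closest_filter_py : Prop := ∀ (red : List (Int × Int)) (blue : List (Int × Int)), Dom_passes_cross_color_closest_filter_py red blue → Spec_passes_cross_color_closest_filter_py red blue (passes_cross_color_closest_filter_py red blue)

-- ===== LEMMAS AND PROOFS =====

-- arithmetic facts about the hex metric
lemma pyDelta_nonneg (a b : Int × Int) : 0 ≤ pyDelta a b := by
  simp only [pyDelta]
  nlinarith [sq_nonneg (2 * (a.1 - b.1) + (a.2 - b.2)), sq_nonneg (a.2 - b.2)]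

lemma pyDelta_comm (a b : Int × Int) : pyDelta a b = pyDelta b a := by
  simp only [pyDelta]; ring

lemma pyDelta_eq_zero_iff (a b : Int × Int) : pyDelta a b = 0 ↔ a = b := by
  constructor
  · intro h
    simp only [pyDelta] at h
    have h1 : a.2 - b.2 = 0 := by
      nlinarith [sq_nonneg (2 * (a.1 - b.1) + (a.2 - b.2)), sq_nonneg (a.2 - b.2)]
    have h2 : a.1 - b.1 = 0 := by nlinarith
    exact Prod.ext (by omega) (by omega)
  · intro h; subst h; simp [pyDelta]

lemma form_lt_four_iff (dq dr : Int) :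
    dq * dq + dq * dr + dr * dr < 4 ↔ (dq, dr) ∈ nearOffs := by
  constructor
  · intro h
    have hdr1 : -2 ≤ dr := by nlinarith [sq_nonneg (2 * dq + dr), sq_nonneg (dr - 2)]
    have hdr2 : dr ≤ 2 := by nlinarith [sq_nonneg (2 * dq + dr), sq_nonneg (dr + 2)]
    have hdq1 : -2 ≤ dq := by nlinarith [sq_nonneg (dq + dr + 2), sq_nonneg (dq + 2)]
    have hdq2 : dq ≤ 2 := by nlinarith [sq_nonneg (dq + dr - 2), sq_nonneg (dq - 2)]
    interval_cases dq <;> interval_cases dr <;> simp_all [nearOffs, nei1Offs]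
  · intro h
    fin_cases h <;> norm_num

lemma form_eq_one_iff (dq dr : Int) :
    dq * dq + dq * dr + dr * dr = 1 ↔ (dq, dr) ∈ nei1Offs := by
  constructor
  · intro h
    have hdr1 : -2 ≤ dr := by nlinarith [sq_nonneg (2 * dq + dr), sq_nonneg (dr - 2)]
    have hdr2 : dr ≤ 2 := by nlinarith [sq_nonneg (2 * dq + dr), sq_nonneg (dr + 2)]
    have hdq1 : -2 ≤ dq := by nlinarith [sq_nonneg (dq + dr + 2), sq_nonneg (dq + 2)]
    have hdq2 : dq ≤ 2 := by nlinarith [sq_nonneg (dq + dr - 2), sq_nonneg (dq - 2)]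
    interval_cases dq <;> interval_cases dr <;> simp_all [nei1Offs]
  · intro h
    fin_cases h <;> norm_num

lemma pyDelta_lt_four_iff (a b : Int × Int) :
    pyDelta a b < 4 ↔ (b.1 - a.1, b.2 - a.2) ∈ nearOffs := by
  rw [pyDelta_comm]
  simpa [pyDelta] using form_lt_four_iff (b.1 - a.1) (b.2 - a.2)

lemma pyDelta_eq_one_iff (a b : Int × Int) :
    pyDelta a b = 1 ↔ (b.1 - a.1, b.2 - a.2) ∈ nei1Offs := by
  rw [pyDelta_comm]
  simpa [pyDelta] using form_eq_one_iff (b.1 - a.1) (b.2 - a.2)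

-- the min-accumulating fold of A
lemma foldl_pyStep_some (ds : List Int) (a : Int) :
    ds.foldl pyStep (some a) = some (ds.foldl min a) := by
  induction ds generalizing a with
  | nil => rfl
  | cons d t ih => simp [pyStep, ih]

lemma F_cons (d : Int) (ds : List Int) :
    (d :: ds).foldl pyStep none = some (ds.foldl min d) := by
  simp [pyStep, foldl_pyStep_some]

lemma min_all_iff (c d : Int) (ds : List Int) :
    c ≤ ds.foldl min d ↔ ∀ x ∈ d :: ds, c ≤ x := by
  constructor
  · intro h x hx
    rcases List.mem_cons.1 hx with rfl | hx
    · exact le_trans h (PySem.List.foldl_min_le ds x).1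
    · exact le_trans h ((PySem.List.foldl_min_le ds d).2 x hx)
  · intro h
    rcases PySem.List.foldl_min_mem ds d with he | he
    · rw [he]; exact h d (List.mem_cons_self)
    · exact h _ (List.mem_cons_of_mem _ he)

lemma min_eq_one_iff (d : Int) (ds : List Int) :
    ds.foldl min d = 1 ↔ (1 ∈ d :: ds ∧ ∀ x ∈ d :: ds, 1 ≤ x) := by
  constructor
  · intro h
    constructor
    · rcases PySem.List.foldl_min_mem ds d with he | he
      · rw [← h, he]; exact List.mem_cons_self
      · rw [← h]; exact List.mem_cons_of_mem _ he
    · exact (min_all_iff 1 d ds).1 (le_of_eq h.symm)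
  · rintro ⟨h1, h2⟩
    have hle : 1 ≤ ds.foldl min d := (min_all_iff 1 d ds).2 h2
    have hge : ds.foldl min d ≤ 1 := by
      rcases List.mem_cons.1 h1 with he | h1
      · exact le_of_le_of_eq (PySem.List.foldl_min_le ds d).1 he.symm
      · exact (PySem.List.foldl_min_le ds d).2 1 h1
    omega

-- list of all within-pair deltas, in A's traversal order
def sameD : List (Int × Int) → List Int
  | [] => []
  | a :: t => t.map (pyDelta a) ++ sameD t

lemma within_gen (pts pre : List (Int × Int)) (best : Option Int) :
    (PySem.List.enumerate pts (pre.length : Int)).foldl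
      (fun best ia =>
        (PySem.List.slice (pre ++ pts) (some (ia.1 + 1)) none).foldl
          (fun b q => pyStep b (pyDelta ia.2 q)) best) best
    = (sameD pts).foldl pyStep best := by
  induction pts generalizing pre best with
  | nil => simp [PySem.List.enumerate_nil, sameD]
  | cons a t ih =>
    rw [PySem.List.enumerate_cons]
    simp only [List.foldl_cons]
    have hsl : PySem.List.slice (pre ++ a :: t) (some ((pre.length : Int) + 1)) none = t := by
      have hc : ((pre.length : Int) + 1) = ((pre.length + 1 : Nat) : Int) := by push_cast; ring
      have hsplit : pre ++ a :: t = (pre ++ [a]) ++ t := by simp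
      rw [hc, PySem.List.slice_from_natCast, hsplit]
      have hlen : pre.length + 1 = (pre ++ [a]).length := by simp
      rw [hlen, List.drop_left]
    rw [hsl]
    have hstart : (pre.length : Int) + 1 = ((pre ++ [a]).length : Int) := by
      simp
    have hbase : pre ++ a :: t = (pre ++ [a]) ++ t := by simp
    rw [hstart, hbase, ih (pre ++ [a])]
    simp [sameD, List.foldl_append, List.foldl_map]

lemma sameD_nil_of_short (pts : List (Int × Int)) (h : pts.length < 2) : sameD pts = [] := by
  match pts, h with
  | [], _ => rfl
  | [a], _ => simp [sameD]

lemma minDeltaWithin_eq (pts : List (Int × Int)) :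
    minDeltaWithin pts = (sameD pts).foldl pyStep none := by
  unfold minDeltaWithin
  split_ifs with h
  · rw [sameD_nil_of_short pts h]; rfl
  · have := within_gen pts [] none
    simpa using this

lemma minDeltaBetween_eq (aPts bPts : List (Int × Int)) :
    minDeltaBetween aPts bPts =
      (aPts.flatMap (fun a => bPts.map (pyDelta a))).foldl pyStep none := by
  unfold minDeltaBetween
  split_ifs with h
  · rcases h with rfl | rfl <;> simp [List.flatMap]
  · rw [List.foldl_flatMap]
    apply PySem.List.foldl_congr_mem
    intro acc x _
    rw [List.foldl_map]

lemma zero_mem_sameD_iff (l : List (Int × Int)) : 0 ∈ sameD l ↔ ¬ l.Nodup := by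
  induction l with
  | nil => simp [sameD]
  | cons a t ih =>
    simp only [sameD, List.mem_append, List.mem_map, List.nodup_cons, ih]
    constructor
    · rintro (⟨b, hb, hd⟩ | h)
      · have : a = b := (pyDelta_eq_zero_iff a b).1 hd
        subst this
        exact fun hn => hn.1 hb
      · exact fun hn => h hn.2
    · intro h
      by_cases hm : a ∈ t
      · exact Or.inl ⟨a, hm, by simp [pyDelta]⟩
      · by_cases hn : t.Nodup
        · exact absurd ⟨hm, hn⟩ h
        · exact Or.inr hn

lemma one_mem_sameD_iff (l : List (Int × Int)) :
    1 ∈ sameD l ↔ ∃ a ∈ l, ∃ b ∈ l, pyDelta a b = 1 := by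
  induction l with
  | nil => simp [sameD]
  | cons c t ih =>
    simp only [sameD, List.mem_append, List.mem_map, ih]
    constructor
    · rintro (⟨b, hb, hd⟩ | ⟨x, hx, y, hy, hd⟩)
      · exact ⟨c, List.mem_cons_self, b, List.mem_cons_of_mem _ hb, hd⟩
      · exact ⟨x, List.mem_cons_of_mem _ hx, y, List.mem_cons_of_mem _ hy, hd⟩
    · rintro ⟨x, hx, y, hy, hd⟩
      rcases List.mem_cons.1 hx with hxe | hx
      · rcases List.mem_cons.1 hy with hye | hy
        · exfalso
          rw [hxe, hye] at hd
          have h0 : pyDelta c c = 0 := (pyDelta_eq_zero_iff c c).2 rfl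
          omega
        · rw [hxe] at hd
          exact Or.inl ⟨y, hy, hd⟩
      · rcases List.mem_cons.1 hy with hye | hy
        · rw [hye, pyDelta_comm] at hd
          exact Or.inl ⟨x, hx, hd⟩
        · exact Or.inr ⟨x, hx, y, hy, hd⟩

lemma mem_sameD_nonneg (l : List (Int × Int)) (d : Int) (h : d ∈ sameD l) : 0 ≤ d := by
  induction l with
  | nil => simp [sameD] at h
  | cons a t ih =>
    simp only [sameD, List.mem_append, List.mem_map] at h
    rcases h with ⟨b, _, rfl⟩ | h
    · exact pyDelta_nonneg a b
    · exact ih h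

lemma len_ofList_eq_iff (l : List (Int × Int)) :
    (PySem.Set.ofList l).length = l.length ↔ l.Nodup := by
  have hnd : (PySem.Set.ofList l).Nodup := PySem.Set.nodup_ofList l
  have hperm : (PySem.Set.ofList l).Perm l.dedup := by
    rw [List.perm_ext_iff_of_nodup hnd l.nodup_dedup]
    intro x
    rw [PySem.Set.mem_ofList, List.mem_dedup]
  rw [hperm.length_eq]
  constructor
  · intro h
    have hsub := l.dedup_sublist
    have := hsub.eq_of_length h
    rw [← this]
    exact l.nodup_dedup
  · intro h; rw [List.dedup_eq_self.2 h]

-- intermediate facts about the within-minimum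
lemma W_pos_iff (l : List (Int × Int)) (d : Int) (ds : List Int) (h : sameD l = d :: ds) :
    1 ≤ ds.foldl min d ↔ l.Nodup := by
  rw [min_all_iff, ← h]
  constructor
  · intro hall
    by_contra hn
    rw [← zero_mem_sameD_iff] at hn
    have := hall 0 hn
    omega
  · intro hn x hx
    have h0 : (0 : Int) ∉ sameD l := fun hz => ((zero_mem_sameD_iff l).1 hz) hn
    have h1 := mem_sameD_nonneg l x hx
    have h2 : x ≠ 0 := fun he => h0 (he ▸ hx)
    omega

lemma W_one_iff (l : List (Int × Int)) (d : Int) (ds : List Int) (h : sameD l = d :: ds) :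
    ds.foldl min d = 1 ↔ (l.Nodup ∧ ∃ a ∈ l, ∃ b ∈ l, pyDelta a b = 1) := by
  rw [min_eq_one_iff, ← h, one_mem_sameD_iff]
  constructor
  · rintro ⟨h1, h2⟩
    refine ⟨?_, h1⟩
    rw [← (W_pos_iff l d ds h), min_all_iff, ← h]
    exact h2
  · rintro ⟨hn, h1⟩
    refine ⟨h1, ?_⟩
    rw [show (∀ x ∈ sameD l, 1 ≤ x) ↔ 1 ≤ ds.foldl min d by rw [min_all_iff, ← h]]
    exact (W_pos_iff l d ds h).2 hn

lemma sameD_nil_info (l : List (Int × Int)) (h : sameD l = []) :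
    l.Nodup ∧ ¬ ∃ a ∈ l, ∃ b ∈ l, pyDelta a b = 1 := by
  constructor
  · rw [← not_not (a := l.Nodup), ← zero_mem_sameD_iff, h]; simp
  · rw [← one_mem_sameD_iff, h]; simp

-- characterizations of the two programs
def FilterQ (red blue : List (Int × Int)) : Prop :=
  red ≠ [] ∧ blue ≠ [] ∧ (∀ a ∈ red, ∀ b ∈ blue, 4 ≤ pyDelta a b) ∧
    red.Nodup ∧ blue.Nodup ∧
    ((∃ a ∈ red, ∃ b ∈ red, pyDelta a b = 1) ∨ (∃ a ∈ blue, ∃ b ∈ blue, pyDelta a b = 1))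

lemma A_eq_false_iff (red blue : List (Int × Int)) :
    passes_cross_color_closest_filter_py red blue = false ↔ FilterQ red blue := by
  unfold passes_cross_color_closest_filter_py FilterQ
  rw [minDeltaBetween_eq, minDeltaWithin_eq, minDeltaWithin_eq]
  cases hcd : red.flatMap (fun a => blue.map (pyDelta a)) with
  | nil =>
    simp only [List.foldl_nil]
    have : red = [] ∨ blue = [] := by
      rcases red with _ | ⟨a, t⟩
      · exact Or.inl rfl
      · rcases blue with _ | ⟨b, s⟩
        · exact Or.inr rfl
        · exfalso
          have : pyDelta a b ∈ (a :: t).flatMap (fun a => (b :: s).map (pyDelta a)) := by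
            simp
          rw [hcd] at this
          simp at this
    constructor
    · intro h; exact absurd h (by simp)
    · rintro ⟨h1, h2, _⟩
      rcases this with rfl | rfl
      · exact absurd rfl h1
      · exact absurd rfl h2
  | cons d ds =>
    rw [F_cons]
    have hne : red ≠ [] ∧ blue ≠ [] := by
      have hd : d ∈ red.flatMap (fun a => blue.map (pyDelta a)) := by rw [hcd]; simp
      rw [List.mem_flatMap] at hd
      rcases hd with ⟨a, ha, hb⟩
      rw [List.mem_map] at hb
      rcases hb with ⟨b, hb, _⟩
      exact ⟨List.ne_nil_of_mem ha, List.ne_nil_of_mem hb⟩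
    have hcross : 4 ≤ ds.foldl min d ↔ ∀ a ∈ red, ∀ b ∈ blue, 4 ≤ pyDelta a b := by
      rw [min_all_iff, ← hcd]
      constructor
      · intro h a ha b hb
        exact h _ (by rw [List.mem_flatMap]; exact ⟨a, ha, by rw [List.mem_map]; exact ⟨b, hb, rfl⟩⟩)
      · intro h x hx
        rw [List.mem_flatMap] at hx
        rcases hx with ⟨a, ha, hb⟩
        rw [List.mem_map] at hb
        rcases hb with ⟨b, hb, rfl⟩
        exact h a ha b hb
    -- case on the two within-minima
    cases hr : sameD red with
    | nil =>
      cases hb : sameD blue with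
      | nil =>
        have h1 := sameD_nil_info red hr
        have h2 := sameD_nil_info blue hb
        show true = false ↔ _
        constructor
        · intro h; exact absurd h (by simp)
        · rintro ⟨_, _, _, _, _, hadj⟩
          rcases hadj with h | h
          · exact absurd h h1.2
          · exact absurd h h2.2
      | cons e es =>
        have h1 := sameD_nil_info red hr
        rw [F_cons]
        show (if es.foldl min e = 1 ∧ 4 ≤ ds.foldl min d then false else true) = false ↔ _
        constructor
        · intro h
          split_ifs at h with hc
          · exact ⟨hne.1, hne.2, hcross.1 hc.2, h1.1,
              ((W_one_iff blue e es hb).1 hc.1).1, Or.inr ((W_one_iff blue e es hb).1 hc.1).2⟩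
        · rintro ⟨_, _, hc4, _, hnb, hadj⟩
          have hadjb : ∃ a ∈ blue, ∃ b ∈ blue, pyDelta a b = 1 := by
            rcases hadj with h | h
            · exact absurd h h1.2
            · exact h
          rw [if_pos ⟨(W_one_iff blue e es hb).2 ⟨hnb, hadjb⟩, hcross.2 hc4⟩]
    | cons e es =>
      cases hb : sameD blue with
      | nil =>
        have h2 := sameD_nil_info blue hb
        rw [F_cons]
        show (if es.foldl min e = 1 ∧ 4 ≤ ds.foldl min d then false else true) = false ↔ _
        constructor
        · intro h
          split_ifs at h with hc
          · exact ⟨hne.1, hne.2, hcross.1 hc.2,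
              ((W_one_iff red e es hr).1 hc.1).1, h2.1, Or.inl ((W_one_iff red e es hr).1 hc.1).2⟩
        · rintro ⟨_, _, hc4, hnr, _, hadj⟩
          have hadjr : ∃ a ∈ red, ∃ b ∈ red, pyDelta a b = 1 := by
            rcases hadj with h | h
            · exact h
            · exact absurd h h2.2
          rw [if_pos ⟨(W_one_iff red e es hr).2 ⟨hnr, hadjr⟩, hcross.2 hc4⟩]
      | cons f fs =>
        rw [F_cons, F_cons]
        simp only [show ∀ x y : Int, List.filterMap id [some x, some y] = [x, y] from fun _ _ => rfl,
          PySem.List.min?_id_cons, List.foldl_cons, List.foldl_nil]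
        set x := es.foldl min e with hx
        set y := fs.foldl min f with hy
        have hmin : min x y = 1 ↔ (x = 1 ∧ 1 ≤ y) ∨ (y = 1 ∧ 1 ≤ x) := by
          rcases le_total x y with h | h <;> simp [h] <;> omega
        constructor
        · intro h
          split_ifs at h with hc
          · rcases hmin.1 hc.1 with ⟨h1, h2⟩ | ⟨h1, h2⟩
            · exact ⟨hne.1, hne.2, hcross.1 hc.2, ((W_one_iff red e es hr).1 h1).1,
                (W_pos_iff blue f fs hb).1 h2, Or.inl ((W_one_iff red e es hr).1 h1).2⟩
            · exact ⟨hne.1, hne.2, hcross.1 hc.2, (W_pos_iff red e es hr).1 h2,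
                ((W_one_iff blue f fs hb).1 h1).1, Or.inr ((W_one_iff blue f fs hb).1 h1).2⟩
        · rintro ⟨_, _, hc4, hnr, hnb, hadj⟩
          have : min x y = 1 := by
            rcases hadj with h | h
            · exact hmin.2 (Or.inl ⟨(W_one_iff red e es hr).2 ⟨hnr, h⟩,
                (W_pos_iff blue f fs hb).2 hnb⟩)
            · exact hmin.2 (Or.inr ⟨(W_one_iff blue f fs hb).2 ⟨hnb, h⟩,
                (W_pos_iff red e es hr).2 hnr⟩)
          rw [if_pos ⟨this, hcross.2 hc4⟩]

lemma probe_iff (pts other : List (Int × Int)) (offs : List (Int × Int)) (P : Int → Prop)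
    (hP : ∀ a b : Int × Int, P (pyDelta a b) ↔ (b.1 - a.1, b.2 - a.2) ∈ offs) :
    (pts.any fun p => offs.any fun o =>
        PySem.Set.contains (PySem.Set.ofList other) (p.1 + o.1, p.2 + o.2)) = true ↔
      ∃ a ∈ pts, ∃ b ∈ other, P (pyDelta a b) := by
  simp only [List.any_eq_true, PySem.Set.contains_eq_listContains, List.contains_iff_mem,
    PySem.Set.mem_ofList]
  constructor
  · rintro ⟨p, hp, o, ho, hmem⟩
    refine ⟨p, hp, (p.1 + o.1, p.2 + o.2), hmem, ?_⟩
    rw [hP]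
    simpa using ho
  · rintro ⟨a, ha, b, hb, hd⟩
    rw [hP] at hd
    refine ⟨a, ha, (b.1 - a.1, b.2 - a.2), hd, ?_⟩
    have : (a.1 + (b.1 - a.1), a.2 + (b.2 - a.2)) = b := by
      apply Prod.ext <;> simp
    rwa [this]

lemma B_eq_false_iff (red blue : List (Int × Int)) :
    passes_cross_color_closest_filter_py_alt red blue = false ↔ FilterQ red blue := by
  have hcross := probe_iff red blue nearOffs (fun d => d < 4) pyDelta_lt_four_iff
  have hadjr : hasAdjacent red (PySem.Set.ofList red) = true ↔
      ∃ a ∈ red, ∃ b ∈ red, pyDelta a b = 1 :=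
    probe_iff red red nei1Offs (fun d => d = 1) pyDelta_eq_one_iff
  have hadjb : hasAdjacent blue (PySem.Set.ofList blue) = true ↔
      ∃ a ∈ blue, ∃ b ∈ blue, pyDelta a b = 1 :=
    probe_iff blue blue nei1Offs (fun d => d = 1) pyDelta_eq_one_iff
  rw [show passes_cross_color_closest_filter_py_alt red blue =
      (if red.isEmpty || blue.isEmpty then true
       else if red.any (fun p => nearOffs.any fun o =>
           PySem.Set.contains (PySem.Set.ofList blue) (p.1 + o.1, p.2 + o.2)) then true
       else if (PySem.Set.ofList red).length ≠ red.length ||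
           (PySem.Set.ofList blue).length ≠ blue.length then true
       else !(hasAdjacent red (PySem.Set.ofList red) || hasAdjacent blue (PySem.Set.ofList blue)))
      from rfl]
  unfold FilterQ
  split_ifs with h1 h2 h3
  · simp only [Bool.or_eq_true, List.isEmpty_iff] at h1
    constructor
    · intro h; exact absurd h (by simp)
    · rintro ⟨hr, hb, _⟩
      rcases h1 with rfl | rfl
      · exact absurd rfl hr
      · exact absurd rfl hb
  · constructor
    · intro h; exact absurd h (by simp)
    · rintro ⟨_, _, hc4, _⟩
      rcases hcross.1 h2 with ⟨a, ha, b, hb, hd⟩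
      have := hc4 a ha b hb
      have hd' : pyDelta a b < 4 := hd
      omega
  · constructor
    · intro h; exact absurd h (by simp)
    · rintro ⟨_, _, _, hnr, hnb, _⟩
      simp only [Bool.or_eq_true, decide_eq_true_eq] at h3
      rcases h3 with h | h
      · exact h ((len_ofList_eq_iff red).2 hnr)
      · exact h ((len_ofList_eq_iff blue).2 hnb)
  · simp only [Bool.or_eq_true, List.isEmpty_iff, not_or] at h1
    simp only [Bool.or_eq_true, decide_eq_true_eq, not_or, not_not] at h3
    rw [Bool.not_eq_false', Bool.or_eq_true]
    constructor
    · intro h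
      refine ⟨h1.1, h1.2, ?_, (len_ofList_eq_iff red).1 h3.1, (len_ofList_eq_iff blue).1 h3.2, ?_⟩
      · intro a ha b hb
        by_contra hlt
        exact h2 (hcross.2 ⟨a, ha, b, hb, show pyDelta a b < 4 by omega⟩)
      · rcases h with h | h
        · exact Or.inl (hadjr.1 h)
        · exact Or.inr (hadjb.1 h)
    · rintro ⟨_, _, _, _, _, hadj⟩
      rcases hadj with h | h
      · exact Or.inl (hadjr.2 h)
      · exact Or.inr (hadjb.2 h)

-- ===== VERDICT (by name: the statement is the Claim_ definition above) =====
theorem passes_cross_color_closest_filter_py_spec : Claim_equal_passes_cross_color_closest_filter_py := by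
  intro red blue _
  unfold Spec_passes_cross_color_closest_filter_py
  have hA := A_eq_false_iff red blue
  have hB := B_eq_false_iff red blue
  cases hA' : passes_cross_color_closest_filter_py red blue <;>
    cases hB' : passes_cross_color_closest_filter_py_alt red blue <;> simp_all
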